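-- pv_equiv track=rewrite | github.com/DvirLehrer/cropper | src/line_distance_stats.py | _best_word_segment_distance
-- ===== SOURCE A (Python) =====
-- from typing import List, Tuple
--
-- def _levenshtein(a: str, b: str) -> int:
--     if a == b:
--         return 0
--     if not a:
--         return len(b)
--     if not b:
--         return len(a)
--     if len(a) < len(b):
--         a, b = b, a
--     prev = list(range(len(b) + 1))
--     for i, ca in enumerate(a, start=1):
--         curr = [i]
--         for j, cb in enumerate(b, start=1):
--             insert = curr[j - 1] + 1
--             delete = prev[j] + 1
--             replace = prev[j - 1] + (ca != cb)
--             curr.append(min(insert, delete, replace))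
--         prev = curr
--     return prev[-1]
--
-- def _best_word_segment_distance(
--     line: str, target_words: List[str], length_tolerance: int = 5
-- ) -> Tuple[int, str]:
--     line = line.strip()
--     if not line:
--         return 0, ""
--     if not target_words:
--         return _levenshtein(line, ""), ""
--     n = len(target_words)
--     word_lens = [len(w) for w in target_words]
--     prefix = [0] * (n + 1)
--     for i in range(n):
--         prefix[i + 1] = prefix[i] + word_lens[i]
--
--     def seg_len(i: int, j: int) -> int:
--         if j < i:
--             return 0
--         return (prefix[j + 1] - prefix[i]) + (j - i)
--
--     target_len = len(line)
--     best_dist = 10**9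
--     best_segment = ""
--     for i in range(n):
--         j_min = i
--         while j_min < n and seg_len(i, j_min) < target_len - length_tolerance:
--             j_min += 1
--         j_max = j_min
--         while j_max < n and seg_len(i, j_max) <= target_len + length_tolerance:
--             j_max += 1
--         for j in range(j_min, j_max):
--             segment = " ".join(target_words[i : j + 1])
--             dist = _levenshtein(line, segment)
--             if dist < best_dist:
--                 best_dist = dist
--                 best_segment = segment
--                 if best_dist == 0:
--                     return best_dist, best_segment
--     return best_dist, best_segment
-- ===== SOURCE B (Python) =====
-- from typing import List, Tuple
--
-- def _advance_row(prev, line, ch):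
--     # one Levenshtein DP step: row for segment+ch vs line, from row for segment vs line
--     left = prev[0] + 1
--     curr = [left]
--     for cb, diag, up in zip(line, prev, prev[1:]):
--         left = min(left + 1, up + 1, diag + (ch != cb))
--         curr.append(left)
--     return curr
--
-- def _best_word_segment_distance(
--     line: str, target_words: List[str], length_tolerance: int = 5
-- ) -> Tuple[int, str]:
--     line = line.strip()
--     if not line:
--         return 0, ""
--     if not target_words:
--         return len(line), ""
--     n = len(target_words)
--     word_lens = [len(w) for w in target_words]
--     prefix = [0] * (n + 1)
--     for i in range(n):
--         prefix[i + 1] = prefix[i] + word_lens[i]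
--
--     def seg_len(i: int, j: int) -> int:
--         if j < i:
--             return 0
--         return (prefix[j + 1] - prefix[i]) + (j - i)
--
--     target_len = len(line)
--     best_dist = 10**9
--     best_segment = ""
--     for i in range(n):
--         j_min = i
--         while j_min < n and seg_len(i, j_min) < target_len - length_tolerance:
--             j_min += 1
--         j_max = j_min
--         while j_max < n and seg_len(i, j_max) <= target_len + length_tolerance:
--             j_max += 1
--         if j_min >= j_max:
--             continue
--         # one rolling DP row, extended word by word across the whole window
--         row = list(range(target_len + 1))
--         seg = ""
--         for k in range(i, j_min):
--             chunk = target_words[k] if k == i else " " + target_words[k]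
--             seg += chunk
--             for ch in chunk:
--                 row = _advance_row(row, line, ch)
--         for j in range(j_min, j_max):
--             chunk = target_words[j] if j == i else " " + target_words[j]
--             seg += chunk
--             for ch in chunk:
--                 row = _advance_row(row, line, ch)
--             dist = row[-1]
--             if dist < best_dist:
--                 best_dist = dist
--                 best_segment = seg
--                 if best_dist == 0:
--                     return best_dist, best_segment
--     return best_dist, best_segment
-- ===== Notes on version B (the rewrite author's own statement) =====
-- stated objective: faster
-- what changed: Instead of calling a fresh full Levenshtein on every candidate segment, B keeps one rolling DP row per start index and extends it character-by-character as the segment grows by one word (building the segment string incrementally too), so each tolerance window costs one DP sweep instead of one per candidate; intended as faster (removes the per-window candidate factor): a timing run measured roughly 7-11x at the largest size where both programs finished (n=64), unconfirmed at n=256 where both timed out.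
import Mathlib
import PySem

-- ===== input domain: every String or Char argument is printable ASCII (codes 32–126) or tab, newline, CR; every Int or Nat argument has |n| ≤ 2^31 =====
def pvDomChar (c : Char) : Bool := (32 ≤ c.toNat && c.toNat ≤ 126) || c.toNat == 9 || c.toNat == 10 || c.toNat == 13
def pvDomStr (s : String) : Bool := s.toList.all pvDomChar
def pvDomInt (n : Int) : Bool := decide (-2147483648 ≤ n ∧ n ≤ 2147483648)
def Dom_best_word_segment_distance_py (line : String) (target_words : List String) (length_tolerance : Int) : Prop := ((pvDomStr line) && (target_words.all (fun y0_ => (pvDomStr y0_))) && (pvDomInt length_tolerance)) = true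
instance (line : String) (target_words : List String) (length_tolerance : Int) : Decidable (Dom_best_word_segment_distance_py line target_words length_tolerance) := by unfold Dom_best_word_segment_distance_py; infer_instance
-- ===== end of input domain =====

-- B replaces A's per-candidate full Levenshtein recomputation by one rolling DP row per start
-- index, extended character by character as the segment grows by one word (intended as faster;
-- a timing run measured roughly 7-11x at the largest size where both programs finished).


-- ===== PORT A =====
-- Python's `(ca != cb)` used as an int
def pvCost (a b : Char) : Int := if a = b then 0 else 1

-- helpers shared by BOTH ports: Source A and Source B contain this code verbatim
-- (word_lens/prefix construction, seg_len, and the two j-scan while loops).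
def pvPrefix (target_words : List String) : List Int :=
  (target_words.map (fun w => (w.toList.length : Int))).foldl
    (fun acc l => acc ++ [acc.getLastD 0 + l]) [0]

def pvSegLen (pref : List Int) (i j : Int) : Int :=
  if j < i then 0
  else ((PySem.List.pyGet? pref (j + 1)).getD 0 - (PySem.List.pyGet? pref i).getD 0) + (j - i)

-- while j_min < n and seg_len(i, j_min) < target_len - length_tolerance: j_min += 1
def pvJMin (pref : List Int) (i tl tol n j : Int) : Int :=
  if h : j < n ∧ pvSegLen pref i j < tl - tol then pvJMin pref i tl tol n (j + 1) else j
termination_by (n - j).toNat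
decreasing_by omega

-- while j_max < n and seg_len(i, j_max) <= target_len + length_tolerance: j_max += 1
def pvJMax (pref : List Int) (i tl tol n j : Int) : Int :=
  if h : j < n ∧ pvSegLen pref i j ≤ tl + tol then pvJMax pref i tl tol n (j + 1) else j
termination_by (n - j).toNat
decreasing_by omega

-- inner row loop of A's _levenshtein: curr = [i]; for j, cb in enumerate(b, 1): …
-- (the .getD 0 defaults are unreachable: every index Python uses is in range)
def pvLevInner (ca : Char) (prev : List Int) (i : Int) (b : List Char) : List Int :=
  (PySem.List.enumerate b 1).foldl
    (fun curr jcb =>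
      let insert := (PySem.List.pyGet? curr (jcb.1 - 1)).getD 0 + 1
      let delete := (PySem.List.pyGet? prev jcb.1).getD 0 + 1
      let replace := (PySem.List.pyGet? prev (jcb.1 - 1)).getD 0 + pvCost ca jcb.2
      curr ++ [min (min insert delete) replace])
    [i]

-- prev = list(range(len(b)+1)); for i, ca in enumerate(a, 1): prev = curr-row
def pvLevLoop (a b : List Char) : List Int :=
  (PySem.List.enumerate a 1).foldl (fun prev ica => pvLevInner ica.2 prev ica.1 b)
    ((List.range (b.length + 1)).map (Int.ofNat))

-- A's _levenshtein
def pvLevA (a b : String) : Int :=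
  if a = b then 0
  else if a.toList = [] then (b.toList.length : Int)
  else if b.toList = [] then (a.toList.length : Int)
  else
    let p := if a.toList.length < b.toList.length then (b, a) else (a, b)
    (PySem.List.pyGet? (pvLevLoop p.1.toList p.2.toList) (-1)).getD 0

-- for j in range(j_min, j_max): … (Except.error = the early `return` at dist 0)
def pvAInner (line : String) (ws : List String) (i : Int) :
    List Int → Int × String → Except (Int × String) (Int × String)
  | [], best => .ok best
  | j :: rest, best =>
    let segment := PySem.Str.join " " (PySem.List.slice ws (some i) (some (j + 1)))
    let dist := pvLevA line segment
    if dist < best.1 then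
      if dist = 0 then .error (dist, segment)
      else pvAInner line ws i rest (dist, segment)
    else pvAInner line ws i rest best

def pvAOuter (line : String) (ws : List String) (pref : List Int) (tl tol n : Int) :
    List Int → Int × String → Int × String
  | [], best => best
  | i :: rest, best =>
    let jmin := pvJMin pref i tl tol n i
    let jmax := pvJMax pref i tl tol n jmin
    match pvAInner line ws i (PySem.List.pyRange jmin jmax 1) best with
    | .error r => r
    | .ok best' => pvAOuter line ws pref tl tol n rest best'

def best_word_segment_distance_py (line : String) (target_words : List String) (length_tolerance : Int) : Int × String :=
  let line := PySem.Str.strip line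
  if line.toList = [] then (0, "")
  else if target_words = [] then (pvLevA line "", "")
  else
    let n : Int := target_words.length
    let pref := pvPrefix target_words
    let tl : Int := line.toList.length
    pvAOuter line target_words pref tl length_tolerance n (PySem.List.pyRange 0 n 1) (10 ^ 9, "")

-- ===== PORT B =====
-- inner zip loop of _advance_row: for cb, diag, up in zip(line, prev, prev[1:]): …
def pvAdvGo (ch : Char) (left : Int) : List Char → List Int → List Int → List Int
  | cb :: cr, diag :: dr, up :: ur =>
    let l' := min (min (left + 1) (up + 1)) (diag + pvCost ch cb)
    l' :: pvAdvGo ch l' cr dr ur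
  | _, _, _ => []

def pvAdvance (prev : List Int) (lineChars : List Char) (ch : Char) : List Int :=
  let left := (PySem.List.pyGet? prev 0).getD 0 + 1
  left :: pvAdvGo ch left lineChars prev (PySem.List.slice prev (some 1) none)

-- for k in range(i, j_min): grow (row, seg) without evaluating
def pvBGrowLoop (line : String) (ws : List String) (i : Int) :
    List Int → List Int × String → List Int × String
  | [], st => st
  | k :: rest, st =>
    let w := (PySem.List.pyGet? ws k).getD ""
    let chunk := if k = i then w else " " ++ w
    let seg := st.2 ++ chunk
    let row := chunk.toList.foldl (fun r ch => pvAdvance r line.toList ch) st.1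
    pvBGrowLoop line ws i rest (row, seg)

-- for j in range(j_min, j_max): grow then evaluate row[-1]
def pvBEvalLoop (line : String) (ws : List String) (i : Int) :
    List Int → List Int × String → Int × String → Except (Int × String) (Int × String)
  | [], _, best => .ok best
  | j :: rest, st, best =>
    let w := (PySem.List.pyGet? ws j).getD ""
    let chunk := if j = i then w else " " ++ w
    let seg := st.2 ++ chunk
    let row := chunk.toList.foldl (fun r ch => pvAdvance r line.toList ch) st.1
    let dist := (PySem.List.pyGet? row (-1)).getD 0
    if dist < best.1 then
      if dist = 0 then .error (dist, seg)
      else pvBEvalLoop line ws i rest (row, seg) (dist, seg)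
    else pvBEvalLoop line ws i rest (row, seg) best

def pvBOuter (line : String) (ws : List String) (pref : List Int) (tl tol n : Int) :
    List Int → Int × String → Int × String
  | [], best => best
  | i :: rest, best =>
    let jmin := pvJMin pref i tl tol n i
    let jmax := pvJMax pref i tl tol n jmin
    if jmin ≥ jmax then pvBOuter line ws pref tl tol n rest best
    else
      let base := (List.range (line.toList.length + 1)).map (Int.ofNat)
      let st := pvBGrowLoop line ws i (PySem.List.pyRange i jmin 1) (base, "")
      match pvBEvalLoop line ws i (PySem.List.pyRange jmin jmax 1) st best with
      | .error r => r
      | .ok best' => pvBOuter line ws pref tl tol n rest best'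

def best_word_segment_distance_py_alt (line : String) (target_words : List String) (length_tolerance : Int) : Int × String :=
  let line := PySem.Str.strip line
  if line.toList = [] then (0, "")
  else if target_words = [] then ((line.toList.length : Int), "")
  else
    let n : Int := target_words.length
    let pref := pvPrefix target_words
    let tl : Int := line.toList.length
    pvBOuter line target_words pref tl length_tolerance n (PySem.List.pyRange 0 n 1) (10 ^ 9, "")

-- ===== PRECONDITION & SPEC =====
def Spec_best_word_segment_distance_py (line : String) (target_words : List String) (length_tolerance : Int) (out : Int × String) : Prop := out = best_word_segment_distance_py_alt line target_words length_tolerance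
instance (line : String) (target_words : List String) (length_tolerance : Int) (out : Int × String) : Decidable (Spec_best_word_segment_distance_py line target_words length_tolerance out) := by unfold Spec_best_word_segment_distance_py; infer_instance

-- ===== CLAIM (what is proved, stated in full; the proofs are below) =====
def Claim_equal_best_word_segment_distance_py : Prop := ∀ (line : String) (target_words : List String) (length_tolerance : Int), Dom_best_word_segment_distance_py line target_words length_tolerance → Spec_best_word_segment_distance_py line target_words length_tolerance (best_word_segment_distance_py line target_words length_tolerance)

-- ===== LEMMAS AND PROOFS =====

-- recursive Levenshtein distance (proof-side specification)
def pvD : List Char → List Char → Int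
  | [], ys => (ys.length : Int)
  | _ :: xs, [] => (xs.length : Int) + 1
  | x :: xs, y :: ys =>
    min (min (pvD xs (y :: ys) + 1) (pvD (x :: xs) ys + 1)) (pvD xs ys + pvCost x y)
termination_by xs ys => xs.length + ys.length

lemma pvCost_symm (a b : Char) : pvCost a b = pvCost b a := by
  unfold pvCost; by_cases h : a = b
  · simp [h]
  · simp [h]; exact fun h' => h h'.symm

lemma pvD_nil_right (u : List Char) : pvD u [] = (u.length : Int) := by
  cases u <;> simp [pvD]

lemma pvCost_nonneg (a b : Char) : 0 ≤ pvCost a b := by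
  unfold pvCost; split <;> norm_num

lemma pvD_nonneg (u v : List Char) : 0 ≤ pvD u v := by
  fun_induction pvD u v with
  | case1 ys => simp
  | case2 x xs => positivity
  | case3 x xs y ys ih1 ih2 ih3 =>
    simp only [le_min_iff]
    have := pvCost_nonneg x y
    refine ⟨⟨by omega, by omega⟩, by omega⟩

lemma pvD_self (u : List Char) : pvD u u = 0 := by
  induction u with
  | nil => simp [pvD]
  | cons x xs ih =>
    have h1 := pvD_nonneg xs (x :: xs)
    have h2 := pvD_nonneg (x :: xs) xs
    rw [show pvD (x :: xs) (x :: xs) = min (min (pvD xs (x :: xs) + 1) (pvD (x :: xs) xs + 1))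
          (pvD xs xs + pvCost x x) from by simp only [pvD]]
    rw [ih, show pvCost x x = 0 from by simp [pvCost]]
    exact min_eq_right (le_min (by omega) (by omega))

lemma pvD_symm (u v : List Char) : pvD u v = pvD v u := by
  induction u generalizing v with
  | nil => simp [pvD, pvD_nil_right]
  | cons x xs ih =>
    induction v with
    | nil => simp [pvD, pvD_nil_right]
    | cons y ys ihv =>
      simp only [pvD]
      rw [ih (y :: ys), ihv, ih ys, pvCost_symm x y,
        min_comm (pvD (y :: ys) xs + 1) (pvD ys (x :: xs) + 1)]

-- pvE p q = distance between p and q read through the DP orientation (reversed lists)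
def pvE (p q : List Char) : Int := pvD p.reverse q.reverse

lemma pvE_nil_right (p : List Char) : pvE p [] = (p.length : Int) := by
  simp [pvE, pvD_nil_right]

lemma pvE_nil_left (q : List Char) : pvE [] q = (q.length : Int) := by
  simp [pvE, pvD]

lemma pvE_self (u : List Char) : pvE u u = 0 := by simp [pvE, pvD_self]

lemma pvE_symm (p q : List Char) : pvE p q = pvE q p := by simp [pvE, pvD_symm]

lemma pvE_snoc_snoc (p q : List Char) (c y : Char) :
    pvE (p ++ [c]) (q ++ [y]) =
      min (min (pvE (p ++ [c]) q + 1) (pvE p (q ++ [y]) + 1)) (pvE p q + pvCost c y) := by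
  unfold pvE
  simp only [List.reverse_append, List.reverse_cons, List.reverse_nil, List.nil_append,
    List.singleton_append]
  simp only [pvD]
  rw [min_comm (pvD p.reverse (y :: q.reverse) + 1) (pvD (c :: p.reverse) q.reverse + 1)]

-- the full DP row for segment p against line, as prefix distances (q = consumed prefix)
def pvRowTail (p : List Char) : List Char → List Char → List Int
  | q, [] => []
  | q, y :: r => pvE p (q ++ [y]) :: pvRowTail p (q ++ [y]) r

def pvRowF (p q rest : List Char) : List Int := pvE p q :: pvRowTail p q rest

lemma pvRowTail_eq_rowF (p q : List Char) (y : Char) (r : List Char) :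
    pvRowTail p q (y :: r) = pvRowF p (q ++ [y]) r := by
  simp [pvRowTail, pvRowF]

lemma pvRowTail_snoc (p : List Char) : ∀ (rest q : List Char) (y : Char),
    pvRowTail p q (rest ++ [y]) = pvRowTail p q rest ++ [pvE p (q ++ rest ++ [y])] := by
  intro rest
  induction rest with
  | nil => intro q y; simp [pvRowTail]
  | cons z r ih =>
    intro q y
    simp only [List.cons_append, pvRowTail, ih (q ++ [z]) y]
    simp [List.append_assoc]

lemma pvRowF_snoc (p : List Char) : ∀ (rest q : List Char) (y : Char),
    pvRowF p q (rest ++ [y]) = pvRowF p q rest ++ [pvE p (q ++ rest ++ [y])] := by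
  intro rest q y
  simp [pvRowF, pvRowTail_snoc]

lemma pvRowF_get (p : List Char) : ∀ (rest q : List Char) (k : Nat), k ≤ rest.length →
    PySem.List.pyGet? (pvRowF p q rest) (k : Int) = some (pvE p (q ++ rest.take k)) := by
  intro rest
  induction rest with
  | nil =>
    intro q k hk
    have hk0 : k = 0 := by simpa using hk
    subst hk0
    simp [pvRowF, pvRowTail, PySem.List.pyGet?_natCast]
  | cons z r ih =>
    intro q k hk
    cases k with
    | zero => simp [pvRowF, PySem.List.pyGet?_natCast]
    | succ k' =>
      have hk' : k' ≤ r.length := by simpa using hk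
      have h := ih (q ++ [z]) k' hk'
      rw [PySem.List.pyGet?_natCast] at h ⊢
      simp only [pvRowF, pvRowTail]
      simp only [List.getElem?_cons_succ]
      rw [show (pvE p (q ++ [z]) :: pvRowTail p (q ++ [z]) r) = pvRowF p (q ++ [z]) r from rfl, h]
      simp [List.append_assoc]

lemma pvRowF_last (p : List Char) : ∀ (rest q : List Char),
    PySem.List.pyGet? (pvRowF p q rest) (-1) = some (pvE p (q ++ rest)) := by
  intro rest
  induction rest with
  | nil => intro q; simp [pvRowF, pvRowTail, PySem.List.pyGet?_neg_one]
  | cons y r ih =>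
    intro q
    rw [PySem.List.pyGet?_neg_one]
    have h := ih (q ++ [y])
    rw [PySem.List.pyGet?_neg_one] at h
    rw [show pvRowF p q (y :: r) = pvE p q :: pvRowF p (q ++ [y]) r from by
      simp [pvRowF, pvRowTail_eq_rowF]]
    rw [show (pvE p q :: pvRowF p (q ++ [y]) r).getLast? = (pvRowF p (q ++ [y]) r).getLast? from by
      simp [pvRowF, List.getLast?_cons_cons]]
    rw [h]
    simp

lemma pvRowTail_nil_left : ∀ (rest q : List Char),
    pvRowTail [] q rest = (List.range rest.length).map (fun t => ((q.length + 1 + t : Nat) : Int)) := by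
  intro rest
  induction rest with
  | nil => intro q; simp [pvRowTail]
  | cons y r ih =>
    intro q
    simp only [pvRowTail, ih (q ++ [y]), List.length_cons]
    rw [List.range_succ_eq_map]
    simp only [List.map_cons, List.map_map]
    congr 1
    · simp [pvE_nil_left]
    · refine List.map_congr_left fun t _ => ?_
      simp only [Function.comp_apply, List.length_append, List.length_cons, List.length_nil]
      congr 1
      omega

lemma pvBase_eq_rowF (line : List Char) :
    (List.range (line.length + 1)).map (Int.ofNat) = pvRowF [] [] line := by
  simp only [pvRowF, pvRowTail_nil_left, pvE_nil_left]
  rw [List.range_succ_eq_map]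
  simp only [List.map_cons, List.map_map]
  congr 1
  · simp
    intro a _
    ring

-- B's advance implements one DP row extension
lemma pvAdvGo_row (c : Char) (p : List Char) : ∀ (rest q : List Char),
    pvAdvGo c (pvE (p ++ [c]) q) rest (pvE p q :: pvRowTail p q rest) (pvRowTail p q rest)
      = pvRowTail (p ++ [c]) q rest := by
  intro rest
  induction rest with
  | nil => intro q; simp [pvAdvGo, pvRowTail]
  | cons y r ih =>
    intro q
    simp only [pvRowTail, pvAdvGo]
    rw [← pvE_snoc_snoc p q c y]
    rw [ih (q ++ [y])]

lemma pvAdvance_row (c : Char) (p line : List Char) :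
    pvAdvance (pvRowF p [] line) line c = pvRowF (p ++ [c]) [] line := by
  unfold pvAdvance
  rw [PySem.List.slice_from_one]
  rw [show pvRowF p [] line = pvE p [] :: pvRowTail p [] line from rfl]
  rw [PySem.List.pyGet?_zero_cons]
  simp only [Option.getD_some, List.tail_cons]
  have hl : pvE p [] + 1 = pvE (p ++ [c]) [] := by
    rw [pvE_nil_right, pvE_nil_right]; simp
  rw [hl, pvAdvGo_row c p line []]
  rfl

lemma pvFoldAdvance (line : List Char) : ∀ (cs p : List Char),
    cs.foldl (fun r ch => pvAdvance r line ch) (pvRowF p [] line) = pvRowF (p ++ cs) [] line := by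
  intro cs
  induction cs with
  | nil => intro p; simp
  | cons c cr ih =>
    intro p
    simp only [List.foldl_cons]
    rw [pvAdvance_row c p line, ih (p ++ [c])]
    simp

-- A's inner row loop implements the same DP row extension
lemma pvLevInnerAux (ca : Char) (p b : List Char) : ∀ (rest q : List Char), b = q ++ rest →
    (PySem.List.enumerate rest ((q.length : Int) + 1)).foldl
      (fun curr jcb =>
        let insert := (PySem.List.pyGet? curr (jcb.1 - 1)).getD 0 + 1
        let delete := (PySem.List.pyGet? (pvRowF p [] b) jcb.1).getD 0 + 1
        let replace := (PySem.List.pyGet? (pvRowF p [] b) (jcb.1 - 1)).getD 0 + pvCost ca jcb.2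
        curr ++ [min (min insert delete) replace])
      (pvRowF (p ++ [ca]) [] q) = pvRowF (p ++ [ca]) [] b := by
  intro rest
  induction rest with
  | nil =>
    intro q hb
    rw [List.append_nil] at hb
    subst hb
    simp [PySem.List.enumerate_nil]
  | cons cb r ih =>
    intro q hb
    rw [PySem.List.enumerate_cons]
    simp only [List.foldl_cons]
    have g1 : PySem.List.pyGet? (pvRowF (p ++ [ca]) [] q) ((q.length : Int) + 1 - 1)
        = some (pvE (p ++ [ca]) q) := by
      have hc : ((q.length : Int) + 1 - 1) = ((q.length : Nat) : Int) := by push_cast; ring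
      rw [hc, pvRowF_get (p ++ [ca]) q [] q.length (le_refl _)]
      simp
    have g2 : PySem.List.pyGet? (pvRowF p [] b) ((q.length : Int) + 1)
        = some (pvE p (q ++ [cb])) := by
      have hc : ((q.length : Int) + 1) = ((q.length + 1 : Nat) : Int) := by push_cast; ring
      rw [hc, pvRowF_get p b [] (q.length + 1) (by subst hb; simp)]
      subst hb
      rw [List.take_append]
      simp
      rw [List.take_of_length_le (by omega)]
    have g3 : PySem.List.pyGet? (pvRowF p [] b) ((q.length : Int) + 1 - 1)
        = some (pvE p q) := by
      have hc : ((q.length : Int) + 1 - 1) = ((q.length : Nat) : Int) := by push_cast; ring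
      rw [hc, pvRowF_get p b [] q.length (by subst hb; simp)]
      subst hb
      rw [List.take_append]
      simp
    simp only [g1, g2, g3, Option.getD_some]
    rw [show pvRowF (p ++ [ca]) [] q ++
          [min (min (pvE (p ++ [ca]) q + 1) (pvE p (q ++ [cb]) + 1)) (pvE p q + pvCost ca cb)]
        = pvRowF (p ++ [ca]) [] (q ++ [cb]) from by
      rw [← pvE_snoc_snoc p q ca cb, pvRowF_snoc]
      simp]
    have hs : ((q.length : Int) + 1 + 1) = (((q ++ [cb]).length : Nat) : Int) + 1 := by
      simp
    rw [hs]
    exact ih (q ++ [cb]) (by simp [hb])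

lemma pvLevInner_row (ca : Char) (p b : List Char) :
    pvLevInner ca (pvRowF p [] b) ((p.length : Int) + 1) b = pvRowF (p ++ [ca]) [] b := by
  unfold pvLevInner
  have h0 : [(p.length : Int) + 1] = pvRowF (p ++ [ca]) [] [] := by
    simp [pvRowF, pvRowTail, pvE_nil_right]
  rw [h0]
  have h := pvLevInnerAux ca p b b [] rfl
  simpa using h

lemma pvLevLoopAux (b : List Char) : ∀ (rest pfx : List Char),
    (PySem.List.enumerate rest ((pfx.length : Int) + 1)).foldl
      (fun prev ica => pvLevInner ica.2 prev ica.1 b) (pvRowF pfx [] b)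
      = pvRowF (pfx ++ rest) [] b := by
  intro rest
  induction rest with
  | nil => intro pfx; simp [PySem.List.enumerate_nil]
  | cons ca r ih =>
    intro pfx
    rw [PySem.List.enumerate_cons]
    simp only [List.foldl_cons]
    rw [pvLevInner_row ca pfx b]
    have hs : ((pfx.length : Int) + 1 + 1) = (((pfx ++ [ca]).length : Nat) : Int) + 1 := by
      simp
    rw [hs, ih (pfx ++ [ca])]
    simp

lemma pvLevLoop_row (a b : List Char) : pvLevLoop a b = pvRowF a [] b := by
  unfold pvLevLoop
  rw [pvBase_eq_rowF b]
  have h := pvLevLoopAux b a []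
  simpa using h

lemma pvLevA_eq (a b : String) : pvLevA a b = pvE a.toList b.toList := by
  unfold pvLevA
  split_ifs with h1 h2 h3 hlt
  · subst h1; rw [pvE_self]
  · rw [h2, pvE_nil_left]
  · rw [h3, pvE_nil_right]
  · show (PySem.List.pyGet? (pvLevLoop b.toList a.toList) (-1)).getD 0 = pvE a.toList b.toList
    rw [pvLevLoop_row]
    have h := pvRowF_last b.toList a.toList []
    rw [List.nil_append] at h
    rw [h]
    simp [pvE_symm a.toList b.toList]
  · show (PySem.List.pyGet? (pvLevLoop a.toList b.toList) (-1)).getD 0 = pvE a.toList b.toList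
    rw [pvLevLoop_row]
    have h := pvRowF_last a.toList b.toList []
    rw [List.nil_append] at h
    rw [h]
    simp

-- A's per-(i,j) segment string
def pvSegA (ws : List String) (i j : Int) : String :=
  PySem.Str.join " " (PySem.List.slice ws (some i) (some (j + 1)))

-- sep.join over a nonempty parts list, extended on the right
lemma pvJoin_snoc (sep : List Char) : ∀ (parts : List (List Char)) (w : List Char),
    parts ≠ [] → PySem.Chars.join sep (parts ++ [w]) = PySem.Chars.join sep parts ++ sep ++ w := by
  intro parts
  induction parts with
  | nil => intro w h; exact absurd rfl h
  | cons x r ih =>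
    intro w h
    cases r with
    | nil => simp [PySem.Chars.join_cons_cons, PySem.Chars.join_singleton]
    | cons y t =>
      have ih' := ih w (by simp)
      simp only [List.cons_append] at ih'
      simp only [List.cons_append, PySem.Chars.join_cons_cons, ih']
      simp [List.append_assoc]

-- one word appended to the running segment equals A's joined slice, one j further
lemma pvStep (ws : List String) (i m : Int) (h0 : 0 ≤ i) (him : i ≤ m) (hmn : m < ws.length) :
    pvSegA ws i (m - 1) ++
      (if m = i then (PySem.List.pyGet? ws m).getD ""
       else " " ++ (PySem.List.pyGet? ws m).getD "") = pvSegA ws i m := by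
  have h0m : 0 ≤ m := le_trans h0 him
  lift i to ℕ using h0 with iN
  lift m to ℕ using h0m with mN
  have him' : iN ≤ mN := by exact_mod_cast him
  have hmn' : mN < ws.length := by exact_mod_cast hmn
  have hw : PySem.List.pyGet? ws (mN : Int) = some ws[mN] := by
    rw [PySem.List.pyGet?_natCast]
    exact List.getElem?_eq_getElem hmn'
  by_cases hmi : (mN : Int) = (iN : Int)
  · have hEq : mN = iN := by exact_mod_cast hmi
    subst hEq
    rw [if_pos hmi]
    apply String.toList_inj.mp
    unfold pvSegA
    rw [show ((mN : Int) - 1 + 1) = (mN : Int) from by ring]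
    rw [PySem.List.slice_natCast]
    rw [show ((mN : Int) + 1) = ((mN + 1 : Nat) : Int) from by push_cast; ring]
    rw [PySem.List.slice_natCast]
    rw [List.drop_eq_getElem_cons hmn']
    simp only [Nat.sub_self, List.take_zero, Nat.add_sub_cancel_left, List.take_succ_cons,
      List.take_zero]
    simp [PySem.Str.toList_join, PySem.Chars.join_nil, PySem.Chars.join_singleton, hw]
  · have hlt : iN < mN := by omega
    rw [if_neg hmi]
    apply String.toList_inj.mp
    unfold pvSegA
    rw [show ((mN : Int) - 1 + 1) = (mN : Int) from by ring]
    rw [PySem.List.slice_natCast]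
    rw [show ((mN : Int) + 1) = ((mN + 1 : Nat) : Int) from by push_cast; ring]
    rw [PySem.List.slice_natCast]
    have htake : (ws.drop iN).take (mN + 1 - iN) =
        (ws.drop iN).take (mN - iN) ++ [ws[mN]] := by
      rw [show mN + 1 - iN = (mN - iN) + 1 from by omega, List.take_add_one]
      congr 1
      rw [List.getElem?_drop, show iN + (mN - iN) = mN from by omega,
        List.getElem?_eq_getElem hmn']
      rfl
    rw [htake]
    simp only [String.toList_append, PySem.Str.toList_join, List.map_append, List.map_cons,
      List.map_nil]
    have hne : (List.map String.toList ((ws.drop iN).take (mN - iN))) ≠ [] := by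
      have hne0 : ((ws.drop iN).take (mN - iN)) ≠ [] := by
        apply List.ne_nil_of_length_pos
        rw [List.length_take, List.length_drop]
        omega
      simpa using hne0
    rw [pvJoin_snoc _ _ _ hne]
    rw [hw]
    simp [List.append_assoc]

-- the scan loops only move forward and stop at n
lemma pvJMin_ge (pref : List Int) (i tl tol n j : Int) : j ≤ pvJMin pref i tl tol n j := by
  fun_induction pvJMin pref i tl tol n j with
  | case1 j h ih => omega
  | case2 j h => omega

lemma pvJMin_le (pref : List Int) (i tl tol n j : Int) :
    pvJMin pref i tl tol n j ≤ max j n := by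
  fun_induction pvJMin pref i tl tol n j with
  | case1 j h ih => omega
  | case2 j h => omega

lemma pvJMax_ge (pref : List Int) (i tl tol n j : Int) : j ≤ pvJMax pref i tl tol n j := by
  fun_induction pvJMax pref i tl tol n j with
  | case1 j h ih => omega
  | case2 j h => omega

lemma pvJMax_le (pref : List Int) (i tl tol n j : Int) :
    pvJMax pref i tl tol n j ≤ max j n := by
  fun_induction pvJMax pref i tl tol n j with
  | case1 j h ih => omega
  | case2 j h => omega

lemma pvBGrowLoop_append (line : String) (ws : List String) (i : Int) :
    ∀ (xs ys : List Int) (st : List Int × String),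
      pvBGrowLoop line ws i (xs ++ ys) st = pvBGrowLoop line ws i ys (pvBGrowLoop line ws i xs st) := by
  intro xs
  induction xs with
  | nil => intro ys st; rfl
  | cons k r ih =>
    intro ys st
    simp only [List.cons_append, pvBGrowLoop]
    exact ih ys _

-- the grow loop reaches exactly the state (DP row, segment) for words i..j0-1
lemma pvGrow (line : String) (ws : List String) (i : Int) (h0 : 0 ≤ i) :
    ∀ (d : Nat), i + d ≤ ws.length →
      pvBGrowLoop line ws i (PySem.List.pyRange i (i + d) 1)
          ((List.range (line.toList.length + 1)).map Int.ofNat, "")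
        = (pvRowF (pvSegA ws i (i + d - 1)).toList [] line.toList, pvSegA ws i (i + d - 1)) := by
  intro d
  induction d with
  | zero =>
    intro _
    rw [show (i + ((0 : Nat) : Int)) = i from by push_cast; ring]
    rw [PySem.List.pyRange_one_eq_nil (le_refl i)]
    have hseg : pvSegA ws i (i - 1) = "" := by
      apply String.toList_inj.mp
      unfold pvSegA
      rw [show (i - 1 + 1) = i from by ring]
      lift i to ℕ using h0 with iN
      rw [PySem.List.slice_natCast]
      simp [PySem.Str.toList_join, PySem.Chars.join_nil]
    rw [hseg]
    simp only [pvBGrowLoop]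
    rw [show ("" : String).toList = [] from rfl, pvBase_eq_rowF]
  | succ d ih =>
    intro hd
    have hstep : (i + ((d + 1 : Nat) : Int)) = (i + d) + 1 := by push_cast; ring
    rw [hstep, PySem.List.pyRange_one_succ_right (by omega)]
    rw [pvBGrowLoop_append]
    rw [ih (by omega)]
    simp only [pvBGrowLoop]
    have hm : i ≤ i + (d : Int) := by omega
    have hmn : i + (d : Int) < ws.length := by push_cast at hd ⊢; omega
    have hseg := pvStep ws i (i + d) h0 hm hmn
    rw [show i + (d : Int) + 1 - 1 = i + (d : Int) from by ring]
    rw [pvFoldAdvance line.toList, ← String.toList_append, hseg]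

-- the eval loop mirrors A's inner j-loop step for step
lemma pvEval (line : String) (ws : List String) (i : Int) (h0 : 0 ≤ i) :
    ∀ (d : Nat) (j0 : Int) (best : Int × String), i ≤ j0 → j0 + d ≤ ws.length →
      pvBEvalLoop line ws i (PySem.List.pyRange j0 (j0 + d) 1)
          (pvRowF (pvSegA ws i (j0 - 1)).toList [] line.toList, pvSegA ws i (j0 - 1)) best
        = pvAInner line ws i (PySem.List.pyRange j0 (j0 + d) 1) best := by
  intro d
  induction d with
  | zero =>
    intro j0 best _ _
    rw [show (j0 + ((0 : Nat) : Int)) = j0 from by push_cast; ring]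
    rw [PySem.List.pyRange_one_eq_nil (le_refl j0)]
    rfl
  | succ d ih =>
    intro j0 best hij hbound
    rw [PySem.List.pyRange_one_cons (by push_cast; omega)]
    have hj0n : j0 < ws.length := by push_cast at hbound ⊢; omega
    have hseg := pvStep ws i j0 h0 hij hj0n
    simp only [pvBEvalLoop, pvAInner]
    rw [pvFoldAdvance line.toList, ← String.toList_append, hseg]
    have hrow := pvRowF_last (pvSegA ws i j0).toList line.toList []
    rw [List.nil_append] at hrow
    rw [hrow]
    simp only [Option.getD_some]
    rw [show PySem.Str.join " " (PySem.List.slice ws (some i) (some (j0 + 1))) = pvSegA ws i j0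
      from rfl]
    rw [show pvLevA line (pvSegA ws i j0) = pvE (pvSegA ws i j0).toList line.toList from by
      rw [pvLevA_eq, pvE_symm]]
    have harg : j0 + ((d + 1 : Nat) : Int) = (j0 + 1) + ((d : Nat) : Int) := by push_cast; ring
    rw [harg]
    have key : ∀ b2 : Int × String,
        pvBEvalLoop line ws i (PySem.List.pyRange (j0 + 1) ((j0 + 1) + (d : Int)) 1)
            (pvRowF (pvSegA ws i j0).toList [] line.toList, pvSegA ws i j0) b2
          = pvAInner line ws i (PySem.List.pyRange (j0 + 1) ((j0 + 1) + (d : Int)) 1) b2 := by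
      intro b2
      have h := ih (j0 + 1) b2 (by omega) (by push_cast at hbound ⊢; omega)
      rw [show j0 + 1 - 1 = j0 from by ring] at h
      exact h
    split_ifs
    · rfl
    · exact key _
    · exact key _

lemma pvOuter_eq (line : String) (ws : List String) (pref : List Int) (tl tol n : Int)
    (hn : n = ws.length) :
    ∀ (is_ : List Int) (best : Int × String), (∀ x ∈ is_, 0 ≤ x ∧ x < n) →
      pvBOuter line ws pref tl tol n is_ best = pvAOuter line ws pref tl tol n is_ best := by
  subst hn
  intro is_
  induction is_ with
  | nil => intro best _; rfl
  | cons i rest ih =>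
    intro best hmem
    obtain ⟨hi0, hin⟩ := hmem i (List.mem_cons_self ..)
    have hrest : ∀ x ∈ rest, 0 ≤ x ∧ x < (ws.length : Int) :=
      fun x hx => hmem x (List.mem_cons_of_mem _ hx)
    simp only [pvBOuter, pvAOuter]
    set jmin := pvJMin pref i tl tol ws.length i with hjmin
    set jmax := pvJMax pref i tl tol ws.length jmin with hjmax
    have h1 : i ≤ jmin := pvJMin_ge pref i tl tol ws.length i
    have h2 : jmin ≤ ws.length := by
      have := pvJMin_le pref i tl tol ws.length i; omega
    have h3 : jmin ≤ jmax := pvJMax_ge pref i tl tol ws.length jmin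
    have h4 : jmax ≤ ws.length := by
      have := pvJMax_le pref i tl tol ws.length jmin; omega
    by_cases hje : jmin ≥ jmax
    · rw [if_pos hje]
      rw [PySem.List.pyRange_one_eq_nil (by omega)]
      simp only [pvAInner]
      exact ih best hrest
    · rw [if_neg hje]
      obtain ⟨dg, hdg⟩ : ∃ dg : ℕ, jmin = i + dg := ⟨(jmin - i).toNat, by omega⟩
      have hg := pvGrow line ws i hi0 dg (by rw [← hdg]; exact h2)
      rw [← hdg] at hg
      rw [hg]
      obtain ⟨de, hde⟩ : ∃ de : ℕ, jmax = jmin + de := ⟨(jmax - jmin).toNat, by omega⟩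
      have he := pvEval line ws i hi0 de jmin best h1 (by rw [← hde]; exact h4)
      rw [← hde] at he
      rw [he]
      rcases hA : pvAInner line ws i (PySem.List.pyRange jmin jmax 1) best with r | b'
      · rfl
      · exact ih b' hrest

lemma pvMain (line : String) (target_words : List String) (length_tolerance : Int) :
    best_word_segment_distance_py line target_words length_tolerance
      = best_word_segment_distance_py_alt line target_words length_tolerance := by
  unfold best_word_segment_distance_py best_word_segment_distance_py_alt
  dsimp only
  split_ifs with h1 h2
  · rfl
  · rw [pvLevA_eq]
    rw [show ("" : String).toList = [] from rfl, pvE_nil_right]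
  · exact (pvOuter_eq (PySem.Str.strip line) target_words (pvPrefix target_words)
      ((PySem.Str.strip line).toList.length : Int) length_tolerance (target_words.length : Int)
      rfl (PySem.List.pyRange 0 (target_words.length : Int) 1) (10 ^ 9, "")
      (fun x hx => by rw [PySem.List.mem_pyRange_one] at hx; exact hx)).symm

-- ===== VERDICT (by name: the statement is the Claim_ definition above) =====
theorem best_word_segment_distance_py_spec : Claim_equal_best_word_segment_distance_py := by
  intro line target_words length_tolerance _
  unfold Spec_best_word_segment_distance_py
  exact pvMain line target_words length_tolerance
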